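-- pv_equiv track=rewrite | github.com/wyk18703232953/myResearch | codeComplex/data/filteredData/python/nlogn/python_nlogn_0409.py | f
-- ===== SOURCE A (Python) =====
-- from collections import defaultdict
--
-- def f(q):
--     q.sort()
--     d = defaultdict(int)
--     for l, r in q:
--         d[l] += 1
--         d[r + 1] -= 1
--     res = 0
--     prev = None
--     ans = [0] * (len(q) + 1)
--     for i in sorted(d.keys()):
--         if prev is None:
--             prev = i
--         else:
--             ans[res] += i - prev
--             prev = i
--         res += d[i]
--     return ans[1:]
-- ===== SOURCE B (Python) =====
-- def f(q):
--     q.sort()  # kept from A: mutates the caller's list (B reads the sorted list)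
--     coords = sorted([l for l, r in q] + [r + 1 for l, r in q])
--     ans = [0] * (len(q) + 1)
--     for a, b in zip(coords, coords[1:]):
--         k = sum(1 for l, r in q if l <= a) - sum(1 for l, r in q if r + 1 <= a)
--         ans[k] += b - a
--     return ans[1:]
-- ===== Notes on version B (the rewrite author's own statement) =====
-- stated objective: alternative
-- what changed: Replaces A's defaultdict of +1/-1 deltas and its running-counter sweep over sorted keys by staged passes with no accumulator at all: B sorts all 2n boundary coordinates (with duplicates) and, for each adjacent pair, recomputes the bucket index from scratch by counting starts <= a and ends <= a; trades the O(n log n) sweep for an O(n^2) recount.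
import Mathlib
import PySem

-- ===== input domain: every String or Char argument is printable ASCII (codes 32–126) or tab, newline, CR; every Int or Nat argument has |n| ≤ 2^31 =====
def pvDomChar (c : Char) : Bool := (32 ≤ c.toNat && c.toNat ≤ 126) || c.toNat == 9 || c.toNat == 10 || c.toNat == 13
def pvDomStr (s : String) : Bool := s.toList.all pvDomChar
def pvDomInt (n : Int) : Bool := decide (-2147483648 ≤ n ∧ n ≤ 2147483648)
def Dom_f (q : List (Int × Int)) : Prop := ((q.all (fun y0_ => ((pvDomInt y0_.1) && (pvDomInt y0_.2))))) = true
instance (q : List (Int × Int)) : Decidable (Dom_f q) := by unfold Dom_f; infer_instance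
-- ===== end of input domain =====

-- B drops A's defaultdict of +1/-1 deltas and its running counter entirely: it sorts all 2n
-- boundary coordinates and, for each adjacent pair, recomputes the bucket index from scratch by
-- counting starts/ends ≤ the segment's left end (objective: alternative; O(n^2), not faster).
-- Both Pythons sort q in place (a caller-visible mutation); equivalence is about the return value.

-- ===== PORT A =====
-- Python `xs[i] += v` (i may be negative: wraparound).  Where Python would raise
-- IndexError it returns xs unchanged — unreachable in both programs: the index is a
-- difference of two counts bounded by n = len(q), and the list has length n+1.
def pyAddAt (xs : List Int) (i : Int) (v : Int) : List Int :=
  match PySem.List.pyGet? xs i with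
  | none => xs
  | some x => PySem.List.pySetD xs i (x + v)

def f (q : List (Int × Int)) : List Int :=
  let qs := PySem.List.sorted2 q (·.1) (·.2)                  -- q.sort()
  let d := qs.foldl (fun d p =>
      let d' := PySem.Dict.modify d p.1 0 (· + 1)             -- d[l] += 1
      PySem.Dict.modify d' (p.2 + 1) 0 (· - 1))               -- d[r + 1] -= 1
    PySem.Dict.empty
  let st := (PySem.List.sorted d.keys (fun x => x) false).foldl
      (fun (s : Int × Option Int × List Int) i =>
        match s.2.1 with
        | none => (s.1 + d.getD i 0, some i, s.2.2)           -- prev is None: prev = i; res += d[i]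
        | some p => (s.1 + d.getD i 0, some i, pyAddAt s.2.2 s.1 (i - p)))
      (0, none, List.replicate (q.length + 1) 0)
  PySem.List.slice st.2.2 (some 1) none                       -- ans[1:]

-- ===== PORT B =====
def f_alt (q : List (Int × Int)) : List Int :=
  let qs := PySem.List.sorted2 q (·.1) (·.2)                  -- q.sort()
  let coords := PySem.List.sorted                              -- sorted([l …] + [r+1 …])
      (qs.map (·.1) ++ qs.map (fun p => p.2 + 1)) (fun x => x) false
  let ans := (coords.zip coords.tail).foldl                    -- for a, b in zip(coords, coords[1:])
      (fun ans ab =>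
        let k := ((qs.filter (fun p => p.1 ≤ ab.1)).length : Int)
               - ((qs.filter (fun p => p.2 + 1 ≤ ab.1)).length : Int)  -- sum(1 …) - sum(1 …)
        pyAddAt ans k (ab.2 - ab.1))                           -- ans[k] += b - a
      (List.replicate (q.length + 1) 0)
  PySem.List.slice ans (some 1) none                           -- ans[1:]

-- ===== PRECONDITION & SPEC =====
def Spec_f (q : List (Int × Int)) (out : List Int) : Prop := out = f_alt q
instance (q : List (Int × Int)) (out : List Int) : Decidable (Spec_f q out) := by unfold Spec_f; infer_instance

-- ===== CLAIM (what is proved, stated in full; the proofs are below) =====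
def Claim_equal_f : Prop := ∀ (q : List (Int × Int)), Dom_f q → Spec_f q (f q)

-- ===== LEMMAS AND PROOFS =====

-- the event list of a query list: for (l, r), coordinate l carries +1 and r+1 carries -1
def ev (qs : List (Int × Int)) : List (Int × Int) := qs.flatMap (fun p => [(p.1, 1), (p.2 + 1, -1)])

-- total delta of event list E at coordinate c
def wt : List (Int × Int) → Int → Int
  | [], _ => 0
  | e :: t, c => (if e.1 = c then e.2 else 0) + wt t c

-- sum of deltas at coordinates ≤ b (the coverage index B recomputes at each segment)
def pref : List (Int × Int) → Int → Int
  | [], _ => 0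
  | e :: t, b => (if e.1 ≤ b then e.2 else 0) + pref t b

-- the common shape of both loops: walk adjacent pairs of a coordinate list,
-- adding each segment length at index g(left end)
def adjFold (g : Int → Int) : List Int → List Int → List Int
  | [], ans => ans
  | [_], ans => ans
  | a :: b :: t, ans => adjFold g (b :: t) (pyAddAt ans (g a) (b - a))

-- one iteration of A's sweep, with d's lookup abstracted into the event pair
def stepB (s : Int × Option Int × List Int) (e : Int × Int) : Int × Option Int × List Int :=
  (s.1 + e.2, some e.1,
   match s.2.1 with
   | none => s.2.2
   | some p => pyAddAt s.2.2 s.1 (e.1 - p))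

-- `g k = running count when segment starting at k is emitted`, along the key list
def StepOK (g w : Int → Int) : Int → List Int → Prop
  | _, [] => True
  | c, k :: t => g k = c + w k ∧ StepOK g w (c + w k) t

lemma pyAddAt_zero (xs : List Int) (i : Int) : pyAddAt xs i 0 = xs := by
  unfold pyAddAt PySem.List.pyGet? PySem.List.pySetD PySem.List.pySet?
  cases h : PySem.List.pyIdx? xs.length i with
  | none => simp
  | some k =>
    simp only [Option.bind_some, Option.map_some]
    cases hg : xs[k]? with
    | none => simp
    | some x =>
      rw [List.getElem?_eq_some_iff] at hg
      obtain ⟨hk, h2⟩ := hg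
      simp only [Option.getD_some, Int.add_zero, ← h2]
      exact List.set_getElem_self hk

-- A's dict-building loop, re-expressed as a single-modify loop over the event list
lemma dictfold_eq (qs : List (Int × Int)) (d0 : PySem.Dict Int Int) :
    qs.foldl (fun d p =>
      let d' := PySem.Dict.modify d p.1 0 (· + 1)
      PySem.Dict.modify d' (p.2 + 1) 0 (· - 1)) d0
    = (ev qs).foldl (fun d e => PySem.Dict.modify d e.1 0 (· + e.2)) d0 := by
  induction qs generalizing d0 with
  | nil => simp [ev]
  | cons p t ih =>
    have hf : (fun v : Int => v - 1) = (fun v : Int => v + (-1)) := funext fun v => by ring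
    rw [List.foldl_cons, ih]
    simp only [ev, List.flatMap_cons, List.foldl_append, List.foldl_cons, List.foldl_nil]
    rw [hf]

lemma getD_dictfold (E : List (Int × Int)) (d0 : PySem.Dict Int Int) (c : Int) :
    ((E.foldl (fun d e => PySem.Dict.modify d e.1 0 (· + e.2)) d0).getD c 0) = d0.getD c 0 + wt E c := by
  induction E generalizing d0 with
  | nil => simp [wt]
  | cons e t ih =>
    rw [List.foldl_cons, ih]
    rw [PySem.Dict.getD_modify]
    simp only [wt]
    by_cases h : e.1 = c
    · simp [h]; ring
    · simp [h, Ne.symm h]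

lemma keys_dictfold (E : List (Int × Int)) :
    (E.foldl (fun d e => PySem.Dict.modify d e.1 0 (· + e.2)) (PySem.Dict.empty : PySem.Dict Int Int)).keys
      = PySem.Set.ofList (E.map (·.1)) := by
  rw [PySem.Dict.keys_foldl_modify_key]
  simp [PySem.Set.ofList_eq_foldl, PySem.Set.update]

lemma nodup_keys_dictfold (E : List (Int × Int)) :
    (E.foldl (fun d e => PySem.Dict.modify d e.1 0 (· + e.2)) (PySem.Dict.empty : PySem.Dict Int Int)).keys.Nodup :=
  PySem.Dict.nodup_keys_foldl_modify_key E (·.1) 0 (fun _ e => (· + e.2)) _ PySem.Dict.nodup_keys_empty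

-- B's zip-with-tail loop is adjFold
lemma zip_adjFold (g : Int → Int) : ∀ (C : List Int) (ans : List Int),
    (C.zip C.tail).foldl (fun ans ab => pyAddAt ans (g ab.1) (ab.2 - ab.1)) ans = adjFold g C ans := by
  intro C
  induction C with
  | nil => intro ans; simp [adjFold]
  | cons a t ih =>
    intro ans
    cases t with
    | nil => simp [adjFold]
    | cons b t' =>
      simp only [List.tail_cons, List.zip_cons_cons, List.foldl_cons]
      have := ih (pyAddAt ans (g a) (b - a))
      simp only [List.tail_cons] at this
      rw [this]
      rfl

-- A's fold, from state (c, some a, ans): the ans component is adjFold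
lemma foldA_adjFold (g w : Int → Int) : ∀ (K : List Int) (c a : Int) (ans : List Int),
    g a = c → StepOK g w c K →
    ((K.map (fun i => (i, w i))).foldl stepB (c, some a, ans)).2.2 = adjFold g (a :: K) ans := by
  intro K
  induction K with
  | nil => intro c a ans _ _; simp [adjFold]
  | cons k t ih =>
    intro c a ans hg hok
    obtain ⟨h1, h2⟩ := hok
    simp only [List.map_cons, List.foldl_cons]
    have hstep : stepB (c, some a, ans) (k, w k) = (c + w k, some k, pyAddAt ans c (k - a)) := rfl
    rw [hstep, ih (c + w k) k _ h1 h2]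
    simp [adjFold, hg]

-- a step of pref along consecutive keys: everything between a (exclusive) and k is at k
lemma pref_step : ∀ (E : List (Int × Int)) (a k : Int),
    (∀ e ∈ E, e.1 ≤ a ∨ e.1 = k ∨ k < e.1) → a < k → pref E k = pref E a + wt E k := by
  intro E
  induction E with
  | nil => intro a k _ _; simp [pref, wt]
  | cons e t ih =>
    intro a k hmem hak
    have ht := ih a k (fun x hx => hmem x (List.mem_cons_of_mem e hx)) hak
    have he := hmem e List.mem_cons_self
    simp only [pref, wt, ht]
    rcases he with h | h | h
    · rw [if_pos h, if_pos (by omega), if_neg (by omega)]; ring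
    · rw [if_pos (le_of_eq h), if_neg (by omega), if_pos h]; ring
    · rw [if_neg (by omega), if_neg (by omega), if_neg (by omega)]; ring

lemma pref_first : ∀ (E : List (Int × Int)) (k : Int),
    (∀ e ∈ E, e.1 = k ∨ k < e.1) → pref E k = wt E k := by
  intro E
  induction E with
  | nil => intro k _; simp [pref, wt]
  | cons e t ih =>
    intro k hmem
    have ht := ih k (fun x hx => hmem x (List.mem_cons_of_mem e hx))
    have he := hmem e List.mem_cons_self
    simp only [pref, wt, ht]
    rcases he with h | h
    · rw [if_pos (le_of_eq h), if_pos h]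
    · rw [if_neg (by omega), if_neg (by omega)]

-- the running count of A's sweep is pref at the current key
lemma stepOK_pref (E : List (Int × Int)) : ∀ (K : List Int) (a : Int),
    K.Pairwise (· < ·) → (∀ e ∈ E, e.1 ≤ a ∨ e.1 ∈ K) → (∀ k ∈ K, a < k) →
    StepOK (pref E) (wt E) (pref E a) K := by
  intro K
  induction K with
  | nil => intro a _ _ _; trivial
  | cons k t ih =>
    intro a hpw hmem hgt
    have hak : a < k := hgt k List.mem_cons_self
    have htk : ∀ x ∈ t, k < x := (List.pairwise_cons.mp hpw).1
    have h1 : pref E k = pref E a + wt E k := by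
      apply pref_step E a k _ hak
      intro e he
      rcases hmem e he with h | h
      · exact Or.inl h
      · rcases List.mem_cons.mp h with h | h
        · exact Or.inr (Or.inl h)
        · exact Or.inr (Or.inr (htk _ h))
    refine ⟨h1, ?_⟩
    rw [← h1]
    apply ih k (List.pairwise_cons.mp hpw).2 _ htk
    intro e he
    rcases hmem e he with h | h
    · exact Or.inl (by omega)
    · rcases List.mem_cons.mp h with h | h
      · exact Or.inl (le_of_eq h)
      · exact Or.inr h

-- a run of equal coordinates contributes nothing to adjFold
lemma adjFold_run (g : Int → Int) (k : Int) : ∀ (G rest : List Int) (ans : List Int),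
    (∀ x ∈ G, x = k) → adjFold g (G ++ k :: rest) ans = adjFold g (k :: rest) ans := by
  intro G
  induction G with
  | nil => intro rest ans _; simp
  | cons x G' ih =>
    intro rest ans hG
    have hx : x = k := hG x List.mem_cons_self
    have hG' : ∀ y ∈ G', y = k := fun y hy => hG y (List.mem_cons_of_mem x hy)
    subst hx
    have h1 : adjFold g (x :: (G' ++ x :: rest)) ans = adjFold g (G' ++ x :: rest) ans := by
      cases hGc : G' with
      | nil =>
        simp [adjFold, pyAddAt_zero]
      | cons y G'' =>
        have hy : y = x := hG' y (hGc ▸ List.mem_cons_self)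
        rw [List.cons_append, hy]
        simp [adjFold, pyAddAt_zero]
    calc adjFold g ((x :: G') ++ x :: rest) ans
          = adjFold g (G' ++ x :: rest) ans := by rw [List.cons_append]; exact h1
      _ = adjFold g (x :: rest) ans := ih rest ans hG' 

-- collapsing duplicates: adjFold over a sorted list equals adjFold over its distinct values
lemma adjFold_dedup (g : Int → Int) : ∀ (K C : List Int) (ans : List Int),
    C.Pairwise (· ≤ ·) → K.Pairwise (· < ·) → (∀ c, c ∈ K ↔ c ∈ C) →
    adjFold g C ans = adjFold g K ans := by
  intro K
  induction K with
  | nil =>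
    intro C ans _ _ hmem
    have : C = [] := List.eq_nil_iff_forall_not_mem.mpr (fun c hc => by simpa using (hmem c).mpr hc)
    rw [this]
  | cons k K' ih =>
    intro C ans hC hK hmem
    have hkC : k ∈ C := (hmem k).1 List.mem_cons_self
    have hmin : ∀ c ∈ C, k ≤ c := by
      intro c hc
      rcases List.mem_cons.mp ((hmem c).2 hc) with h | h
      · omega
      · exact le_of_lt ((List.pairwise_cons.mp hK).1 c h)
    have hsplit : C = C.takeWhile (fun c => c == k) ++ C.dropWhile (fun c => c == k) :=
      (List.takeWhile_append_dropWhile).symm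
    set G := C.takeWhile (fun c => c == k) with hGdef
    set C' := C.dropWhile (fun c => c == k) with hC'def
    have hGk : ∀ x ∈ G, x = k := fun x hx => by
      have := List.mem_takeWhile_imp hx; simpa using this
    have hC'sub : C'.Sublist C := List.dropWhile_sublist _
    have hGne : G ≠ [] := by
      cases hCc : C with
      | nil => rw [hCc] at hkC; simp at hkC
      | cons c₀ rest =>
        have h1 : k ≤ c₀ := hmin c₀ (hCc ▸ List.mem_cons_self)
        have h2 : c₀ ≤ k := by
          rw [hCc] at hkC
          rcases List.mem_cons.mp hkC with h | h
          · omega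
          · exact (List.pairwise_cons.mp (hCc ▸ hC)).1 k h
        have : c₀ = k := le_antisymm h2 h1
        rw [hGdef, hCc, List.takeWhile_cons]
        simp [this]
    -- beyond the k-block every coordinate is > k
    have hC'k : ∀ c ∈ C', k < c := by
      intro c hc
      cases hC'c : C' with
      | nil => rw [hC'c] at hc; simp at hc
      | cons h₀ tl =>
        have hph₀ : (fun c : Int => c == k) h₀ = false := by
          have := List.head?_dropWhile_not (fun c : Int => c == k) C
          rw [← hC'def, hC'c] at this
          simpa using this
        have hh₀k : h₀ ≠ k := by simpa using hph₀
        have hh₀C : h₀ ∈ C := hC'sub.subset (hC'c ▸ List.mem_cons_self)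
        have hlt : k < h₀ := lt_of_le_of_ne (hmin h₀ hh₀C) (Ne.symm hh₀k)
        have hpw : (h₀ :: tl).Pairwise (· ≤ ·) := hC'c ▸ (hC.sublist hC'sub)
        rw [hC'c] at hc
        rcases List.mem_cons.mp hc with rfl | h
        · exact hlt
        · have := (List.pairwise_cons.mp hpw).1 c h
          omega
    have hmem' : ∀ c, c ∈ K' ↔ c ∈ C' := by
      intro c
      constructor
      · intro hc
        have hkc : k < c := (List.pairwise_cons.mp hK).1 c hc
        have hcC : c ∈ C := (hmem c).1 (List.mem_cons_of_mem k hc)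
        rw [hsplit] at hcC
        rcases List.mem_append.mp hcC with h | h
        · have := hGk c h; omega
        · exact h
      · intro hc
        have hcC : c ∈ C := hC'sub.subset hc
        rcases List.mem_cons.mp ((hmem c).2 hcC) with rfl | h
        · exact absurd (hC'k c hc) (lt_irrefl c)
        · exact h
    -- peel the k-block:  C = G₀ ++ [k] ++ C'  with G₀ all k
    have hGlast : ∃ G₀, G = G₀ ++ [k] ∧ ∀ y ∈ G₀, y = k := by
      refine ⟨G.dropLast, ?_, ?_⟩
      · have hx : G.getLast hGne = k := hGk _ (List.getLast_mem _)
        conv_lhs => rw [← List.dropLast_append_getLast hGne, hx]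
      · intro y hy
        exact hGk y ((List.dropLast_sublist _).subset hy)
    obtain ⟨G₀, hGeq, hG₀⟩ := hGlast
    rw [hsplit, hGeq, List.append_assoc, List.singleton_append, adjFold_run g k G₀ C' ans hG₀]
    cases hC'c : C' with
    | nil =>
      have hK' : K' = [] := by
        cases hK'c : K' with
        | nil => rfl
        | cons y t =>
          exfalso
          have : y ∈ C' := (hmem' y).1 (hK'c ▸ List.mem_cons_self)
          rw [hC'c] at this; simp at this
      rw [hK']
    | cons c₂ tl =>
      have hK'ne : K' ≠ [] := by
        intro h
        have : c₂ ∈ K' := (hmem' c₂).2 (hC'c ▸ List.mem_cons_self)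
        rw [h] at this; simp at this
      obtain ⟨k₂, K'', rfl⟩ := List.exists_cons_of_ne_nil hK'ne
      -- heads agree: each is the minimum of the (equal) sets
      have hc₂K : c₂ ∈ k₂ :: K'' := (hmem' c₂).2 (hC'c ▸ List.mem_cons_self)
      have hk₂C : k₂ ∈ C' := (hmem' k₂).1 List.mem_cons_self
      have hminC' : ∀ c ∈ C', c₂ ≤ c := by
        intro c hc
        have hpw : (c₂ :: tl).Pairwise (· ≤ ·) := hC'c ▸ (hC.sublist hC'sub)
        rw [hC'c] at hc
        rcases List.mem_cons.mp hc with rfl | h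
        · omega
        · exact (List.pairwise_cons.mp hpw).1 c h
      have hminK' : ∀ x ∈ k₂ :: K'', k₂ ≤ x := by
        intro x hx
        rcases List.mem_cons.mp hx with rfl | h
        · omega
        · exact le_of_lt ((List.pairwise_cons.mp (List.pairwise_cons.mp hK).2).1 x h)
      have hk₂c₂ : k₂ = c₂ := le_antisymm (by
          have := hminC' k₂ hk₂C; have := hminK' c₂ hc₂K; omega)
        (by have := hminC' k₂ hk₂C; have := hminK' c₂ hc₂K; omega)
      have hstep : adjFold g (k :: c₂ :: tl) ans = adjFold g (c₂ :: tl) (pyAddAt ans (g k) (c₂ - k)) := rfl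
      have hstep2 : adjFold g (k :: k₂ :: K'') ans = adjFold g (k₂ :: K'') (pyAddAt ans (g k) (k₂ - k)) := rfl
      have hA : pyAddAt ans (g k) (k₂ - k) = pyAddAt ans (g k) (c₂ - k) := by rw [hk₂c₂]
      rw [hstep, hstep2, hA, ← hC'c]
      exact ih C' _ (hC.sublist hC'sub) (List.pairwise_cons.mp hK).2 hmem'

-- B's per-segment count is pref of the event list
lemma covIdx_pref (a : Int) : ∀ (qs : List (Int × Int)),
    ((qs.filter (fun p => p.1 ≤ a)).length : Int)
      - ((qs.filter (fun p => p.2 + 1 ≤ a)).length : Int) = pref (ev qs) a := by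
  intro qs
  induction qs with
  | nil => simp [ev, pref]
  | cons p t ih =>
    simp only [ev, List.flatMap_cons, List.cons_append, List.nil_append, pref, List.filter_cons] at *
    by_cases h1 : p.1 ≤ a <;> by_cases h2 : p.2 + 1 ≤ a <;>
      simp only [h1, h2, decide_true, decide_false, if_pos, List.length_cons] <;>
      push_cast <;> omega

-- the boundary multiset B sorts has the same members as the event coordinates
lemma mem_bounds_iff (qs : List (Int × Int)) (c : Int) :
    c ∈ qs.map (·.1) ++ qs.map (fun p => p.2 + 1) ↔ c ∈ (ev qs).map (·.1) := by
  simp only [ev, List.mem_append, List.mem_map, List.mem_flatMap]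
  constructor
  · rintro (⟨p, hp, rfl⟩ | ⟨p, hp, rfl⟩)
    · exact ⟨(p.1, 1), ⟨p, hp, by simp⟩, rfl⟩
    · exact ⟨(p.2 + 1, -1), ⟨p, hp, by simp⟩, rfl⟩
  · rintro ⟨e, ⟨p, hp, hm⟩, rfl⟩
    simp only [List.mem_cons] at hm
    rcases hm with rfl | rfl | h
    · exact Or.inl ⟨p, hp, rfl⟩
    · exact Or.inr ⟨p, hp, rfl⟩
    · simp at h

-- ===== VERDICT (by name: the statement is the Claim_ definition above) =====
theorem f_spec : Claim_equal_f := by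
  intro q _
  show f q = f_alt q
  simp only [f, f_alt]
  rw [dictfold_eq]
  set qs := PySem.List.sorted2 q (·.1) (·.2) with hqs
  set E := ev qs with hE
  set d := E.foldl (fun d e => PySem.Dict.modify d e.1 0 (· + e.2)) (PySem.Dict.empty : PySem.Dict Int Int) with hd
  set K := PySem.List.sorted d.keys (fun x => x) false with hK
  set C := PySem.List.sorted (qs.map (·.1) ++ qs.map (fun p => p.2 + 1)) (fun x => x) false with hC
  set ans0 : List Int := List.replicate (q.length + 1) 0 with hans0
  congr 1
  -- facts about K
  have hgd : ∀ c : Int, d.getD c 0 = wt E c := by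
    intro c
    rw [hd, getD_dictfold, PySem.Dict.getD_empty]
    simp
  have hKnd : K.Nodup := by
    rw [hK]
    exact ((PySem.List.sorted_perm _ _ _).nodup_iff).mpr (nodup_keys_dictfold E)
  have hKle : K.Pairwise (· ≤ ·) := PySem.List.sorted_pairwise _ _
  have hKlt : K.Pairwise (· < ·) := (hKle.and hKnd).imp (fun h => lt_of_le_of_ne h.1 h.2)
  have hmemK : ∀ c, c ∈ K ↔ c ∈ E.map (·.1) := by
    intro c
    rw [hK, PySem.List.mem_sorted, hd, keys_dictfold, PySem.Set.mem_ofList]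
  -- B's side: zip loop = adjFold (pref E) over sorted boundaries C
  have hBfun : (fun (ans : List Int) (ab : Int × Int) =>
        pyAddAt ans (((qs.filter (fun p => p.1 ≤ ab.1)).length : Int)
          - ((qs.filter (fun p => p.2 + 1 ≤ ab.1)).length : Int)) (ab.2 - ab.1))
      = fun ans ab => pyAddAt ans (pref E ab.1) (ab.2 - ab.1) := by
    funext ans ab
    rw [covIdx_pref ab.1 qs]
  rw [hBfun, zip_adjFold (pref E) C ans0]
  -- collapse C's duplicates to K
  have hCle : C.Pairwise (· ≤ ·) := PySem.List.sorted_pairwise _ _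
  have hmemC : ∀ c, c ∈ K ↔ c ∈ C := by
    intro c
    have h1 : c ∈ C ↔ c ∈ (E.map (·.1)) := by
      rw [hC, PySem.List.mem_sorted]
      exact mem_bounds_iff qs c
    rw [hmemK c, h1]
  rw [adjFold_dedup (pref E) K C ans0 hCle hKlt hmemC]
  -- A's side: the sweep over K is adjFold (pref E) K
  have hfun : (fun (s : Int × Option Int × List Int) i =>
        match s.2.1 with
        | none => (s.1 + d.getD i 0, some i, s.2.2)
        | some p => (s.1 + d.getD i 0, some i, pyAddAt s.2.2 s.1 (i - p)))
      = fun s i => stepB s (i, wt E i) := by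
    funext s i
    obtain ⟨c, pr, ans⟩ := s
    rw [← hgd i]
    cases pr <;> rfl
  rw [hfun]
  have hfold : K.foldl (fun s i => stepB s (i, wt E i)) (0, none, ans0)
      = (K.map (fun i => (i, wt E i))).foldl stepB (0, none, ans0) := by
    rw [List.foldl_map]
  rw [hfold]
  cases hKc : K with
  | nil => rfl
  | cons k0 K' =>
    have hk0min : ∀ e ∈ E, e.1 = k0 ∨ k0 < e.1 := by
      intro e he
      have h1 : e.1 ∈ K := (hmemK e.1).2 (List.mem_map_of_mem he)
      rw [hKc] at h1
      rcases List.mem_cons.mp h1 with h | h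
      · exact Or.inl h
      · exact Or.inr ((List.pairwise_cons.mp (hKc ▸ hKlt)).1 e.1 h)
    have hpk0 : pref E k0 = wt E k0 := pref_first E k0 hk0min
    simp only [List.map_cons, List.foldl_cons]
    have hstep : stepB ((0 : Int), (none : Option Int), ans0) (k0, wt E k0)
        = (0 + wt E k0, some k0, ans0) := rfl
    rw [hstep]
    have hok : StepOK (pref E) (wt E) (0 + wt E k0) K' := by
      rw [show (0 : Int) + wt E k0 = pref E k0 by omega]
      apply stepOK_pref E K' k0 (List.pairwise_cons.mp (hKc ▸ hKlt)).2
      · intro e he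
        have h1 : e.1 ∈ K := (hmemK e.1).2 (List.mem_map_of_mem he)
        rw [hKc] at h1
        rcases List.mem_cons.mp h1 with h | h
        · exact Or.inl (le_of_eq h)
        · exact Or.inr h
      · exact (List.pairwise_cons.mp (hKc ▸ hKlt)).1
    rw [foldA_adjFold (pref E) (wt E) K' (0 + wt E k0) k0 ans0 (by omega) hok]
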